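-- pv_equiv track=rewrite | github.com/gasparin52/AyED1-2024-TPs | tp4/ejercicio5.py | filtrar_palabras_a
-- ===== SOURCE A (Python) =====
-- def filtrar_palabras_a(frase:str, n:int) -> str:
--     """
--     Dado un entero y una frase, devuelve las palabras que tenga el mismo numero de carecteres
--     que la cantidad del numero dado.
--
--     pre: recive un str con una frase y un entero.
--
--     post: devielve una str con las palabras que cumplan con la cantidad de caracteres.
--     """
--     palabra = ""
--     contador = 0
--     frase_nueva = ""
--     for i in range(len(frase)):
--         if frase[i] != " ":
--             contador+=1
--             palabra += frase[i]
--         else: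
--             if len(palabra) > n:
--                 frase_nueva += palabra + " "
--             palabra = ""
--             contador = 0
--     return frase_nueva
-- ===== SOURCE B (Python) =====
-- def filtrar_palabras_a(frase: str, n: int) -> str:
--     toks = frase.split(" ")
--     return "".join(t + " " for t in toks[:-1] if len(t) > n)
-- ===== Notes on version B (the rewrite author's own statement) =====
-- stated objective: simpler
-- what changed: B replaces A's character-by-character scanner with dead-variable bookkeeping by a split(" ")-based token pipeline: take all tokens but the last (A only emits a word when it reaches a following space) and join the long ones with a trailing space.
import Mathlib
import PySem

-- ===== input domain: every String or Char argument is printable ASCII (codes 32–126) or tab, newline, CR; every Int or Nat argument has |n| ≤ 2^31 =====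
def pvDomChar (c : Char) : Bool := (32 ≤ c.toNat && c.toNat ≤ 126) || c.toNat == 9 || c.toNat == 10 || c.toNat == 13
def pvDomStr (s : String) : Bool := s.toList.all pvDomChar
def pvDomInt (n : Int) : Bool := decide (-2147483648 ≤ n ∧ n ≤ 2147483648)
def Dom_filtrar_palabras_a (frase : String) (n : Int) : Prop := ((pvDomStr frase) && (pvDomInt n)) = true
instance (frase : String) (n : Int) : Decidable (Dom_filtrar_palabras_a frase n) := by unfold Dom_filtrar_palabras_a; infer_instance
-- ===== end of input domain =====

-- ===== PORT A =====
-- B differs only by decomposition (token pipeline vs char scanner); same return value everywhere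
-- (B keeps A's behaviour of never emitting the word after the last space).
-- Port of A: the index loop over frase is the structural recursion loopA over frase.toList,
-- carrying the same (palabra, contador, frase_nueva) state; branches in source order.
def loopA (n : Int) : List Char → List Char × Int × List Char → List Char
  | [], st => st.2.2
  | c :: rest, st =>
    if c ≠ ' ' then loopA n rest (st.1 ++ [c], st.2.1 + 1, st.2.2)
    else loopA n rest (([] : List Char), 0,
      if (PySem.Chars.len st.1 : Int) > n then st.2.2 ++ st.1 ++ [' '] else st.2.2)

def filtrar_palabras_a (frase : String) (n : Int) : String :=
  String.ofList (loopA n frase.toList ([], 0, []))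

-- ===== PORT B =====
-- Port of B: frase.split(" ") -> PySem.Chars.splitOn, toks[:-1] -> PySem.List.slice,
-- the generator's filter/map, "".join -> PySem.Chars.join [].
def filtrar_palabras_a_alt (frase : String) (n : Int) : String :=
  String.ofList (PySem.Chars.join []
    (((PySem.List.slice (PySem.Chars.splitOn frase.toList [' ']) none (some (-1))).filter
        (fun t => decide ((PySem.Chars.len t : Int) > n))).map (fun t => t ++ [' '])))

-- ===== PRECONDITION & SPEC =====
def Spec_filtrar_palabras_a (frase : String) (n : Int) (out : String) : Prop := out = filtrar_palabras_a_alt frase n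
instance (frase : String) (n : Int) (out : String) : Decidable (Spec_filtrar_palabras_a frase n out) := by unfold Spec_filtrar_palabras_a; infer_instance

-- ===== CLAIM (what is proved, stated in full; the proofs are below) =====
def Claim_equal_filtrar_palabras_a : Prop := ∀ (frase : String) (n : Int), Dom_filtrar_palabras_a frase n → Spec_filtrar_palabras_a frase n (filtrar_palabras_a frase n)

-- ===== LEMMAS AND PROOFS =====

-- proof-side reference: single-char split on ' ' with the current word carried in order
def spSplit : List Char → List Char → List (List Char)
  | [], cur => [cur]
  | c :: rest, cur => if c = ' ' then cur :: spSplit rest [] else spSplit rest (cur ++ [c])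

-- proof-side reference: the emitted output for a token list
def spEmit (n : Int) (toks : List (List Char)) : List Char :=
  (toks.filter (fun t => decide ((t.length : Int) > n))).flatMap (fun t => t ++ [' '])

theorem spSplit_ne_nil (l cur : List Char) : spSplit l cur ≠ [] := by
  cases l with
  | nil => simp [spSplit]
  | cons c rest => simp only [spSplit]; split <;> simp [spSplit_ne_nil]

theorem go_eq_spSplit (fuel : Nat) (l cur : List Char) (acc : List (List Char))
    (h : l.length < fuel) :
    PySem.Chars.splitOn.go [' '] fuel l cur acc = acc.reverse ++ spSplit l cur.reverse := by
  induction fuel generalizing l cur acc with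
  | zero => omega
  | succ m ih =>
    cases l with
    | nil => simp [PySem.Chars.splitOn.go, spSplit]
    | cons c rest =>
      rw [PySem.Chars.splitOn.go]
      by_cases hc : c = ' '
      · subst hc
        simp only [List.isPrefixOf, BEq.rfl, Bool.true_and, if_pos,
          List.length_singleton, List.drop_one, List.tail_cons]
        rw [ih rest [] (cur.reverse :: acc) (Nat.lt_of_succ_lt_succ (by simpa using h))]
        simp [spSplit]
      · have hpre : [' '].isPrefixOf (c :: rest) = false := by
          simp [List.isPrefixOf]; exact fun h' => absurd h'.symm hc
        rw [hpre]
        simp only [Bool.false_eq_true, if_false]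
        rw [ih rest (c :: cur) acc (Nat.lt_of_succ_lt_succ (by simpa using h))]
        simp [spSplit, hc]

theorem splitOn_eq_spSplit (s : List Char) :
    PySem.Chars.splitOn s [' '] = spSplit s [] := by
  unfold PySem.Chars.splitOn
  rw [go_eq_spSplit (s.length + 1) s [] [] (by omega)]
  simp

theorem join_nil_eq_flatten (l : List (List Char)) : PySem.Chars.join [] l = l.flatten := by
  simp [PySem.Chars.join, List.intercalate]
  induction l with
  | nil => rfl
  | cons x t ih => cases t <;> simp_all [List.intersperse]

theorem loopA_eq (n : Int) (cs : List Char) :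
    ∀ (palabra : List Char) (k : Int) (acc : List Char),
    loopA n cs (palabra, k, acc) = acc ++ spEmit n ((spSplit cs palabra).dropLast) := by
  induction cs with
  | nil => intro palabra k acc; simp [loopA, spSplit, spEmit]
  | cons c rest ih =>
    intro palabra k acc
    by_cases hc : c = ' '
    · subst hc
      rw [loopA, if_neg (by simp), ih]
      have hne := spSplit_ne_nil rest ([] : List Char)
      simp only [spSplit, if_true, PySem.Chars.len_eq]
      rw [List.dropLast_cons_of_ne_nil hne]
      by_cases hlen : ((palabra.length : Int) > n)
      · simp [spEmit, hlen, List.append_assoc]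
      · simp [spEmit, hlen]
    · rw [loopA, if_pos (by simpa using hc), ih]
      simp [spSplit, hc]

theorem ports_eq (frase : String) (n : Int) :
    filtrar_palabras_a frase n = filtrar_palabras_a_alt frase n := by
  unfold filtrar_palabras_a filtrar_palabras_a_alt
  rw [loopA_eq n frase.toList [] 0 []]
  rw [splitOn_eq_spSplit, PySem.List.slice_to_neg_one, join_nil_eq_flatten]
  simp [spEmit, List.flatMap_def]

-- ===== VERDICT (by name: the statement is the Claim_ definition above) =====
theorem filtrar_palabras_a_spec : Claim_equal_filtrar_palabras_a := by
  intro frase n _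
  unfold Spec_filtrar_palabras_a
  exact ports_eq frase n
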